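-- pv_equiv track=rewrite | github.com/ArthurBoaro/my-daily-coding-challenge-fcc | January 3, 2026.py | find_left_handed_seats
-- ===== SOURCE A (Python) =====
-- def find_left_handed_seats(table):
--
--     seats = 0
--     top_seats = table[0]
--     bottom_seats = table[1]
--
--     for i in range(len(top_seats)):
--         if top_seats[i] == "U" and (i + 1 >= len(top_seats) or top_seats[i+1] != "R"):
--             seats += 1
--
--     for i in range(len(bottom_seats) - 1, -1, -1):
--         if bottom_seats[i] == "U" and (i - 1 < 0 or bottom_seats[i - 1] != "R"):
--             seats += 1
--
--     return seats
-- ===== SOURCE B (Python) =====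
-- def find_left_handed_seats(table):
--     top, bottom = table[0], table[1]
--     u = sum(1 for c in top if c == "U") + sum(1 for c in bottom if c == "U")
--     blocked_top = sum(1 for x, y in zip(top, top[1:]) if x == "U" and y == "R")
--     blocked_bottom = sum(1 for x, y in zip(bottom, bottom[1:]) if x == "R" and y == "U")
--     return u - blocked_top - blocked_bottom
-- ===== Notes on version B (the rewrite author's own statement) =====
-- stated objective: alternative
-- what changed: replaces A's two index loops with boundary tests by a counting identity: total 'U' seats per row minus the number of adjacent blocking pairs ((U,R) in the top row, (R,U) in the bottom row), computed by element iteration over zipped neighbours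
import Mathlib
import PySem

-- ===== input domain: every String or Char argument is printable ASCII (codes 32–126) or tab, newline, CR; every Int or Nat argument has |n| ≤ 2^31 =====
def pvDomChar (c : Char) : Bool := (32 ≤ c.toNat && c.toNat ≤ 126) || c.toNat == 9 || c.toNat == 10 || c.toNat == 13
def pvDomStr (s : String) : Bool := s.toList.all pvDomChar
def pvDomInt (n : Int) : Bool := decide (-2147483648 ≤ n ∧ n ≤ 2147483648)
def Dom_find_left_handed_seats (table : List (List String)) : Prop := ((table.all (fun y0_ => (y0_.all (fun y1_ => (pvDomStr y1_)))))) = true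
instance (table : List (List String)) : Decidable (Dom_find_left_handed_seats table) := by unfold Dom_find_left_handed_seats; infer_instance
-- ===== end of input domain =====

-- B replaces A's two index loops (with neighbour boundary tests) by the counting
-- identity "count of 'U' per row minus adjacent blocking pairs", via zipped neighbours.

-- ===== PORT A =====
def find_left_handed_seats (table : List (List String)) : Int :=
  match PySem.List.pyGet? table 0, PySem.List.pyGet? table 1 with
  | some top_seats, some bottom_seats =>
    let s1 := (PySem.List.pyRange 0 (top_seats.length : Int) 1).foldl
      (fun seats i =>
        if PySem.List.pyGetD top_seats i "" == "U" &&
           (decide ((top_seats.length : Int) ≤ i + 1) || PySem.List.pyGetD top_seats (i + 1) "" != "R")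
        then seats + 1 else seats) 0
    (PySem.List.pyRange ((bottom_seats.length : Int) - 1) (-1) (-1)).foldl
      (fun seats i =>
        if PySem.List.pyGetD bottom_seats i "" == "U" &&
           (decide (i - 1 < 0) || PySem.List.pyGetD bottom_seats (i - 1) "" != "R")
        then seats + 1 else seats) s1
  | _, _ => 0  -- Python raises IndexError here; excluded by Pre_

-- ===== PORT B =====
def find_left_handed_seats_alt (table : List (List String)) : Int :=
  match table with
  | top :: bottom :: _ =>
    let u : Int := (top.countP (· == "U") : Int) + (bottom.countP (· == "U") : Int)
    let bt : Int := ((top.zip top.tail).countP (fun p => p.1 == "U" && p.2 == "R") : Int)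
    let bb : Int := ((bottom.zip bottom.tail).countP (fun p => p.1 == "R" && p.2 == "U") : Int)
    u - bt - bb
  | _ => 0  -- table[0]/table[1] raise in Python too; excluded by Pre_

-- ===== PRECONDITION & SPEC =====
-- A (and B) index table[0] and table[1]: Pre_ excludes tables with fewer than two rows, on which both raise IndexError.
def Pre_find_left_handed_seats (table : List (List String)) : Prop := 2 ≤ table.length
instance (table : List (List String)) : Decidable (Pre_find_left_handed_seats table) := by unfold Pre_find_left_handed_seats; infer_instance
def pvWitness_find_left_handed_seats : List (List String) := [["U", "R"], ["R", "U"]]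

def Spec_find_left_handed_seats (table : List (List String)) (out : Int) : Prop := out = find_left_handed_seats_alt table
instance (table : List (List String)) (out : Int) : Decidable (Spec_find_left_handed_seats table out) := by unfold Spec_find_left_handed_seats; infer_instance

-- ===== CLAIM (what is proved, stated in full; the proofs are below) =====
def Claim_equal_find_left_handed_seats : Prop := ∀ (table : List (List String)), Dom_find_left_handed_seats table → Pre_find_left_handed_seats table → Spec_find_left_handed_seats table (find_left_handed_seats table)

-- ===== LEMMAS AND PROOFS =====

-- top row: counted positions + blocking (U,R) neighbour pairs = number of 'U'
theorem pv_top_key (l : List String) :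
    (List.range l.length).countP
        (fun k => l.getD k "" == "U" && (decide (l.length ≤ k + 1) || l.getD (k + 1) "" != "R"))
      + (l.zip l.tail).countP (fun p => p.1 == "U" && p.2 == "R")
    = l.countP (· == "U") := by
  induction l with
  | nil => simp
  | cons a rest ih =>
    rw [List.length_cons, List.range_succ_eq_map, List.countP_cons, List.countP_map]
    have hshift :
        (List.range rest.length).countP
            ((fun k => (a :: rest).getD k "" == "U" &&
                (decide (rest.length + 1 ≤ k + 1) || (a :: rest).getD (k + 1) "" != "R")) ∘ Nat.succ)
          = (List.range rest.length).countP
            (fun k => rest.getD k "" == "U" && (decide (rest.length ≤ k + 1) || rest.getD (k + 1) "" != "R")) := by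
      apply List.countP_congr
      intro k _
      simp [Function.comp]
    rw [hshift]
    cases rest with
    | nil => simp
    | cons b rs =>
      simp only [List.zip_cons_cons, List.tail_cons, List.countP_cons] at ih ⊢
      rw [← ih]
      by_cases hA : a = "U" <;> by_cases hB : b = "R" <;> simp [hA, hB] <;> omega

-- bottom row, shifted by one with the previous element made explicit
theorem pv_bot_aux (rest : List String) : ∀ a : String,
    (List.range rest.length).countP
        (fun k => rest.getD k "" == "U" && (a :: rest).getD k "" != "R")
      + ((a :: rest).zip rest).countP (fun p => p.1 == "R" && p.2 == "U")
    = rest.countP (· == "U") := by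
  induction rest with
  | nil => simp
  | cons b rs ih =>
    intro a
    rw [List.length_cons, List.range_succ_eq_map, List.countP_cons, List.countP_map]
    have hshift :
        (List.range rs.length).countP
            ((fun k => (b :: rs).getD k "" == "U" && (a :: b :: rs).getD k "" != "R") ∘ Nat.succ)
          = (List.range rs.length).countP
            (fun k => rs.getD k "" == "U" && (b :: rs).getD k "" != "R") := by
      apply List.countP_congr
      intro k _
      simp [Function.comp]
    rw [hshift]
    have ihb := ih b
    simp only [List.zip_cons_cons, List.countP_cons, List.getD_cons_zero] at ihb ⊢
    rw [← ihb]
    by_cases hA : a = "R" <;> by_cases hB : b = "U" <;> simp [hA, hB] <;> omega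

-- bottom row: counted positions + blocking (R,U) neighbour pairs = number of 'U'
theorem pv_bot_key (l : List String) :
    (List.range l.length).countP
        (fun k => l.getD k "" == "U" && (decide (k = 0) || l.getD (k - 1) "" != "R"))
      + (l.zip l.tail).countP (fun p => p.1 == "R" && p.2 == "U")
    = l.countP (· == "U") := by
  cases l with
  | nil => simp
  | cons a rest =>
    rw [List.length_cons, List.range_succ_eq_map, List.countP_cons, List.countP_map]
    have hshift :
        (List.range rest.length).countP
            ((fun k => (a :: rest).getD k "" == "U" &&
                (decide (k = 0) || (a :: rest).getD (k - 1) "" != "R")) ∘ Nat.succ)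
          = (List.range rest.length).countP
            (fun k => rest.getD k "" == "U" && (a :: rest).getD k "" != "R") := by
      apply List.countP_congr
      intro k _
      simp [Function.comp]
    rw [hshift]
    have hba := pv_bot_aux rest a
    simp only [List.tail_cons, List.getD_cons_zero, List.countP_cons] at hba ⊢
    rw [← hba]
    by_cases hA : a = "U" <;> simp [hA] <;> omega

-- ===== VERDICT (by name: the statement is the Claim_ definition above) =====
theorem find_left_handed_seats_spec : Claim_equal_find_left_handed_seats := by
  intro table _ hpre
  unfold Pre_find_left_handed_seats at hpre
  match table with
  | top :: bottom :: rest =>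
    unfold Spec_find_left_handed_seats find_left_handed_seats find_left_handed_seats_alt
    have h0 : (0:Int) ≤ (rest.length:Int) + 1 := by positivity
    rw [show PySem.List.pyGet? (top :: bottom :: rest) (0 : Int) = some top from by
          simp [PySem.List.pyGet?, PySem.List.pyIdx?, h0],
        show PySem.List.pyGet? (top :: bottom :: rest) (1 : Int) = some bottom from by
          simp [PySem.List.pyGet?, PySem.List.pyIdx?]]
    simp only [PySem.List.pyRange_neg_one_eq_reverse,
               show (-1:Int)+1 = 0 from by norm_num,
               show ((bottom.length:Int) - 1) + 1 = (bottom.length:Int) from by ring]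
    rw [PySem.List.foldl_count_if, PySem.List.foldl_count_if, List.countP_reverse]
    simp only [PySem.List.pyRange_one, sub_zero, Int.toNat_natCast, List.countP_map]
    have htop :
        (List.range top.length).countP
            ((fun i => PySem.List.pyGetD top i "" == "U" &&
                (decide ((top.length : Int) ≤ i + 1) || PySem.List.pyGetD top (i + 1) "" != "R")) ∘ (fun k : Nat => (0:Int) + ↑k))
          = (List.range top.length).countP
            (fun k => top.getD k "" == "U" && (decide (top.length ≤ k + 1) || top.getD (k + 1) "" != "R")) := by
      apply List.countP_congr
      intro k _
      have e1 : ((0:Int) + ↑k) = ((k : Nat) : Int) := by ring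
      have e2 : ((k : Nat) : Int) + 1 = ((k + 1 : Nat) : Int) := by push_cast; ring
      have e3 : decide ((top.length : Int) ≤ ((k + 1 : Nat) : Int)) = decide (top.length ≤ k + 1) := by
        simp only [decide_eq_decide]
        omega
      simp only [Function.comp, e1, e2, e3, PySem.List.pyGetD_natCast]
    have hbot :
        (List.range bottom.length).countP
            ((fun i => PySem.List.pyGetD bottom i "" == "U" &&
                (decide (i - 1 < 0) || PySem.List.pyGetD bottom (i - 1) "" != "R")) ∘ (fun k : Nat => (0:Int) + ↑k))
          = (List.range bottom.length).countP
            (fun k => bottom.getD k "" == "U" && (decide (k = 0) || bottom.getD (k - 1) "" != "R")) := by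
      apply List.countP_congr
      intro k _
      match k with
      | 0 => simp [Function.comp, PySem.List.pyGetD_ofNat', List.getD]
      | Nat.succ k =>
        have e1 : ((0:Int) + ↑(k + 1)) = ((k + 1 : Nat) : Int) := by ring
        have e2 : ((k + 1 : Nat) : Int) - 1 = ((k : Nat) : Int) := by push_cast; ring
        have e3 : decide (((k + 1 : Nat) : Int) - 1 < 0) = false := by
          rw [e2]; simp
        simp only [Function.comp, e1, e2, PySem.List.pyGetD_natCast]
        simp
    rw [htop, hbot]
    have h1 := pv_top_key top
    have h2 := pv_bot_key bottom
    omega
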